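-- pv_equiv track=rewrite | github.com/dw-610/semantic-rate-dist-code | modules/coding.py | extend_dict_to_seq
-- ===== SOURCE A (Python) =====
-- def extend_dict_to_seq(single_dict: dict, n: int):
--     """Extends the key-value pairs of a dictionary to length-n sequences."""
--     n_dict = {(): ()}
--     for i in range(n):
--         n_dict_new = {}
--         for k_seq, v_seq in n_dict.items():
--             for k, v in single_dict.items():
--                 n_dict_new[(*k_seq, k)] = (*v_seq, v)
--         n_dict = n_dict_new
--     return n_dict
-- ===== SOURCE B (Python) =====
-- import itertools
--
--
-- def extend_dict_to_seq(single_dict: dict, n: int):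
--     """Extends the key-value pairs of a dictionary to length-n sequences."""
--     result = {}
--     for combo in itertools.product(single_dict.items(), repeat=n):
--         result[tuple(k for k, _ in combo)] = tuple(v for _, v in combo)
--     return result
-- ===== Notes on version B (the rewrite author's own statement) =====
-- stated objective: idiomatic
-- what changed: Replaces the n explicit dictionary-expansion rounds (rebuilding a new dict of all length-i prefixes on each round) with a single pass over itertools.product(single_dict.items(), repeat=n), splitting each combo into its key tuple and value tuple.
-- outside the precondition, e.g. on extend_dict_to_seq({1: 2}, -1): A returns {(): ()}, B raises ValueError
import Mathlib
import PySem

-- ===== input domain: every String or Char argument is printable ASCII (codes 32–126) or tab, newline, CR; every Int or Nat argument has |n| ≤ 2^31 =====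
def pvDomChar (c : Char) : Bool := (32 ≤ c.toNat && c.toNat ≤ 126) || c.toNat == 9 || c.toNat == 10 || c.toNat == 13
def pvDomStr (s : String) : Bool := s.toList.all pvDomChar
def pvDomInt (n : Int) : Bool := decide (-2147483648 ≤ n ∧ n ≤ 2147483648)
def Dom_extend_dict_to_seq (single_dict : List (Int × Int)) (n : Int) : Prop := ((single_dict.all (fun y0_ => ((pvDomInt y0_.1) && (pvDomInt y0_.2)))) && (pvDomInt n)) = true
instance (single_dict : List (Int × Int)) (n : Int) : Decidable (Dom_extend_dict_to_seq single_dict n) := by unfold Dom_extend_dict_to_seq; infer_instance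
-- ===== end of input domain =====

-- B replaces A's n explicit dict-expansion rounds by one pass over the n-fold Cartesian
-- product of the dict's items (itertools.product); equivalence of return values is proved.


-- ===== PORT A =====
-- n_dict = {(): ()}; for i in range(n): rebuild n_dict_new by appending each (k, v) of
-- single_dict to each (k_seq, v_seq) of n_dict; dict assignment is PySem.Dict.insert.
def extend_dict_to_seq (single_dict : List (Int × Int)) (n : Int) : List (List Int × List Int) :=
  ((PySem.List.pyRange 0 n 1).foldl
    (fun n_dict _i =>
      n_dict.items.foldl
        (fun n_dict_new kv =>
          single_dict.foldl
            (fun n_dict_new p =>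
              n_dict_new.insert (kv.1 ++ [p.1]) (kv.2 ++ [p.2]))
            n_dict_new)
        PySem.Dict.empty)
    (PySem.Dict.ofList [(([] : List Int), ([] : List Int))])).items

-- ===== PORT B =====
-- itertools.product(items, repeat=n): leftmost factor varies slowest.
def pvProduct (items : List (Int × Int)) : Nat → List (List (Int × Int))
  | 0 => [[]]
  | Nat.succ m => items.flatMap (fun x => (pvProduct items m).map (fun t => x :: t))

-- result = {}; for combo in product(single_dict.items(), repeat=n): result[keys] = values
def extend_dict_to_seq_alt (single_dict : List (Int × Int)) (n : Int) : List (List Int × List Int) :=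
  ((pvProduct single_dict n.toNat).foldl
    (fun result combo =>
      result.insert (combo.map (fun p => p.1)) (combo.map (fun p => p.2)))
    PySem.Dict.empty).items

-- ===== PRECONDITION & SPEC =====
-- Pre_ excludes (a) negative n, where A returns {(): ()} but B's itertools.product raises
-- ValueError, and (b) association lists with duplicate keys, which cannot arise from a
-- Python dict argument (the ports' overwrite behaviour there is accidental).
def Pre_extend_dict_to_seq (single_dict : List (Int × Int)) (n : Int) : Prop :=
  0 ≤ n ∧ (single_dict.map Prod.fst).Nodup
instance (single_dict : List (Int × Int)) (n : Int) : Decidable (Pre_extend_dict_to_seq single_dict n) := by unfold Pre_extend_dict_to_seq; infer_instance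

def pvWitness_extend_dict_to_seq : (List (Int × Int)) × Int := ([(1, 2), (3, 4)], 2)

def Spec_extend_dict_to_seq (single_dict : List (Int × Int)) (n : Int) (out : List (List Int × List Int)) : Prop := out = extend_dict_to_seq_alt single_dict n
instance (single_dict : List (Int × Int)) (n : Int) (out : List (List Int × List Int)) : Decidable (Spec_extend_dict_to_seq single_dict n out) := by unfold Spec_extend_dict_to_seq; infer_instance

-- ===== CLAIM (what is proved, stated in full; the proofs are below) =====
def Claim_equal_extend_dict_to_seq : Prop := ∀ (single_dict : List (Int × Int)) (n : Int), Dom_extend_dict_to_seq single_dict n → Pre_extend_dict_to_seq single_dict n → Spec_extend_dict_to_seq single_dict n (extend_dict_to_seq single_dict n)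

-- ===== LEMMAS AND PROOFS =====

-- key/value projections of one combo
def pvMapKV (c : List (Int × Int)) : List Int × List Int := (c.map (·.1), c.map (·.2))

-- one expansion round on combos: append each item to each combo (A's traversal order)
def pvExpand (items : List (Int × Int)) (P : List (List (Int × Int))) : List (List (Int × Int)) :=
  P.flatMap (fun c => items.map (fun p => c ++ [p]))

lemma pvProduct_succ (items : List (Int × Int)) (m : Nat) :
    pvProduct items (m + 1) = pvExpand items (pvProduct items m) := by
  induction m with
  | zero =>
      show items.flatMap (fun x => [[x]]) = _
      simp only [pvExpand, pvProduct, List.flatMap_cons, List.flatMap_nil,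
        List.append_nil, List.nil_append]
      exact Eq.symm List.map_eq_flatMap
  | succ m ih =>
      show items.flatMap (fun x => (pvProduct items (m+1)).map (fun t => x :: t)) = _
      conv_lhs => rw [ih]
      show _ = pvExpand items (items.flatMap (fun x => (pvProduct items m).map (fun t => x :: t)))
      simp only [pvExpand, List.map_flatMap, List.flatMap_assoc, List.flatMap_map, List.map_map]
      rfl

lemma pvProduct_length (items : List (Int × Int)) (m : Nat) :
    ∀ c ∈ pvProduct items m, c.length = m := by
  induction m with
  | zero => simp [pvProduct]
  | succ m ih =>
      intro c hc
      simp only [pvProduct, List.mem_flatMap, List.mem_map] at hc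
      obtain ⟨x, hx, t, ht, rfl⟩ := hc
      simp [ih t ht]

lemma pvNodupBlocks (ks : List Int) (K : List (List Int)) (hks : ks.Nodup) (hK : K.Nodup) :
    (ks.flatMap (fun k => K.map (fun t => k :: t))).Nodup := by
  rw [List.nodup_flatMap]
  constructor
  · intro k _
    exact hK.map (fun a b h => by injection h)
  · refine hks.imp ?_
    intro k k' hne S h1 h2
    simp only [List.mem_map] at h1 h2
    obtain ⟨t, _, rfl⟩ := h1
    obtain ⟨t', _, h⟩ := h2
    injection h with h _
    exact hne h.symm

lemma pvProduct_keys_nodup (items : List (Int × Int)) (hk : (items.map Prod.fst).Nodup)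
    (m : Nat) : ((pvProduct items m).map (fun c => c.map (fun p => p.1))).Nodup := by
  induction m with
  | zero => simp [pvProduct]
  | succ m ih =>
      show ((items.flatMap fun x => (pvProduct items m).map (fun t => x :: t)).map
        (fun c => c.map (fun p => p.1))).Nodup
      rw [List.map_flatMap]
      have : (fun x : Int × Int => ((pvProduct items m).map (fun t => x :: t)).map
          (fun c => c.map (fun p => p.1)))
          = (fun x : Int × Int => ((pvProduct items m).map (fun c => c.map (fun p => p.1))).map
              (fun t => x.1 :: t)) := by
        funext x; simp [List.map_map]
      rw [this]
      have := pvNodupBlocks (items.map Prod.fst)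
        ((pvProduct items m).map (fun c => c.map (fun p => p.1))) hk ih
      rw [List.flatMap_map] at this
      exact this

lemma pvRound (items : List (Int × Int)) (hk : (items.map Prod.fst).Nodup) :
    ∀ (Q : List (List (Int × Int))) (acc : PySem.Dict (List Int) (List Int)),
      (∀ c ∈ Q, ∀ p ∈ items, acc.contains (c.map (fun p => p.1) ++ [p.1]) = false) →
      ((Q.map (fun c => c.map (fun p => p.1))).Nodup) →
      (∀ c ∈ Q, ∀ c' ∈ Q, c.length = c'.length) →
      ((Q.map pvMapKV).foldl
        (fun n_dict_new kv =>
          items.foldl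
            (fun n_dict_new p =>
              n_dict_new.insert (kv.1 ++ [p.1]) (kv.2 ++ [p.2]))
            n_dict_new)
        acc).items
      = acc.items ++ (pvExpand items Q).map pvMapKV := by
  intro Q
  induction Q with
  | nil => intro acc _ _ _; simp [pvExpand]
  | cons c Q ih =>
      intro acc hfresh hQ hlen
      rw [List.map_cons, List.foldl_cons]
      -- the inner fold over fresh keys appends
      have hinj : Function.Injective (fun x : Int => c.map (fun p => p.1) ++ [x]) := by
        intro a b h
        simpa using h
      have hnodupnew : (items.map (fun p => (pvMapKV c).1 ++ [p.1])).Nodup := by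
        show (items.map (fun p => c.map (fun q => q.1) ++ [p.1])).Nodup
        have : (fun p : Int × Int => c.map (fun q => q.1) ++ [p.1])
            = (fun x : Int => c.map (fun q => q.1) ++ [x]) ∘ Prod.fst := rfl
        rw [this, ← List.map_map]
        exact hk.map hinj
      have hstep := PySem.Dict.items_foldl_insert_fresh
        (l := items) (k := fun p => (pvMapKV c).1 ++ [p.1]) (v := fun p => (pvMapKV c).2 ++ [p.2])
        (d := acc) (by intro p hp; exact hfresh c (by simp) p hp) hnodupnew
      set acc' := items.foldl
        (fun n_dict_new p =>
          n_dict_new.insert ((pvMapKV c).1 ++ [p.1]) ((pvMapKV c).2 ++ [p.2]))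
        acc with hacc'
      have hkeys' : acc'.keys
          = acc.keys ++ items.map (fun p => c.map (fun q => q.1) ++ [p.1]) := by
        show acc'.items.map (fun q => q.1) = _
        rw [hstep]
        simp [PySem.Dict.keys, List.map_map, pvMapKV]
      have hfresh' : ∀ c' ∈ Q, ∀ p ∈ items,
          acc'.contains (c'.map (fun q => q.1) ++ [p.1]) = false := by
        intro c' hc' p hp
        rw [PySem.Dict.contains_eq_decide_mem_keys, decide_eq_false_iff_not, hkeys',
          List.mem_append]
        rintro (hmem | hmem)
        · have := hfresh c' (by simp [hc']) p hp
          rw [PySem.Dict.contains_eq_decide_mem_keys, decide_eq_false_iff_not] at this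
          exact this hmem
        · simp only [List.mem_map] at hmem
          obtain ⟨q, hq, heq⟩ := hmem
          have hl : (c'.map (fun q => q.1)).length = (c.map (fun q => q.1)).length := by
            simp [hlen c' (by simp [hc']) c (by simp)]
          have := (List.append_inj heq.symm hl).1
          have hmem' : c.map (fun q => q.1) ∈ Q.map (fun c => c.map (fun q => q.1)) := by
            exact this ▸ List.mem_map_of_mem hc'
          exact (List.nodup_cons.mp hQ).1 hmem'
      have hres := ih acc' hfresh' (List.nodup_cons.mp hQ).2
        (fun a ha b hb => hlen a (by simp [ha]) b (by simp [hb]))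
      rw [hres, hstep]
      have hexp : (pvExpand items (c :: Q)).map pvMapKV
          = items.map (fun p => ((pvMapKV c).1 ++ [p.1], (pvMapKV c).2 ++ [p.2]))
            ++ (pvExpand items Q).map pvMapKV := by
        simp only [pvExpand, List.flatMap_cons, List.map_append, List.map_map]
        refine congrArg (· ++ _) ?_
        refine List.map_congr_left ?_
        intro p _
        simp [pvMapKV]
      rw [hexp]
      simp [List.append_assoc]

lemma pvA_items (items : List (Int × Int)) (hk : (items.map Prod.fst).Nodup) (m : Nat) :
    (Nat.iterate
      (fun n_dict : PySem.Dict (List Int) (List Int) =>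
        n_dict.items.foldl
          (fun n_dict_new kv =>
            items.foldl
              (fun n_dict_new p =>
                n_dict_new.insert (kv.1 ++ [p.1]) (kv.2 ++ [p.2]))
              n_dict_new)
          PySem.Dict.empty)
      m
      (PySem.Dict.ofList [(([] : List Int), ([] : List Int))])).items
    = (pvProduct items m).map pvMapKV := by
  induction m with
  | zero => rfl
  | succ m ih =>
      rw [Function.iterate_succ_apply', ih]
      have hfresh : ∀ c ∈ pvProduct items m, ∀ p ∈ items,
          (PySem.Dict.empty : PySem.Dict (List Int) (List Int)).contains
            (c.map (fun p => p.1) ++ [p.1]) = false := by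
        intro c _ p _
        exact PySem.Dict.contains_empty _
      have := pvRound items hk (pvProduct items m) PySem.Dict.empty hfresh
        (pvProduct_keys_nodup items hk m)
        (fun a ha b hb => by rw [pvProduct_length items m a ha, pvProduct_length items m b hb])
      rw [this, pvProduct_succ]
      rfl

lemma pvFoldl_const {α β : Type} (g : α → α) (d : α) :
    ∀ (l : List β), (l.foldl (fun d _ => g d) d) = Nat.iterate g l.length d := by
  intro l
  induction l generalizing d with
  | nil => rfl
  | cons a t ih => simp only [List.foldl_cons, List.length_cons, ih,
      Function.iterate_succ_apply]

lemma pvB_items (items : List (Int × Int)) (hk : (items.map Prod.fst).Nodup) (m : Nat) :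
    ((pvProduct items m).foldl
      (fun result combo =>
        result.insert (combo.map (fun p => p.1)) (combo.map (fun p => p.2)))
      PySem.Dict.empty).items
    = (pvProduct items m).map pvMapKV := by
  have := PySem.Dict.items_foldl_insert_fresh
    (l := pvProduct items m) (k := fun c => c.map (fun p => p.1))
    (v := fun c => c.map (fun p => p.2)) (d := PySem.Dict.empty)
    (by intro a _; exact PySem.Dict.contains_empty _)
    (pvProduct_keys_nodup items hk m)
  rw [this]
  rfl

-- ===== VERDICT (by name: the statement is the Claim_ definition above) =====
theorem extend_dict_to_seq_spec : Claim_equal_extend_dict_to_seq := by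
  intro single_dict n _hdom hpre
  obtain ⟨hn, hk⟩ := hpre
  show extend_dict_to_seq single_dict n = extend_dict_to_seq_alt single_dict n
  unfold extend_dict_to_seq extend_dict_to_seq_alt
  rw [pvFoldl_const, PySem.List.length_pyRange_one]
  have h0 : (n - 0).toNat = n.toNat := by simp
  rw [h0, pvA_items single_dict hk n.toNat, pvB_items single_dict hk n.toNat]
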